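-- pv_equiv track=rewrite | github.com/JogiFAU/AI_exam_analyzer | ai_exam_analyzer/repeat_reconstruction.py | _candidate_pairs
-- ===== SOURCE A (Python) =====
-- from collections import Counter, defaultdict
-- from typing import Any, Dict, List, Optional, Set, Tuple
--
-- def _candidate_pairs(items: List[Set[str]]) -> Set[Tuple[int, int]]:
--     inv: Dict[str, List[int]] = defaultdict(list)
--     for i, toks in enumerate(items):
--         for t in toks:
--             inv[t].append(i)
--     pairs: Set[Tuple[int, int]] = set()
--     for idxs in inv.values():
--         if len(idxs) <= 1:
--             continue
--         for i in range(len(idxs)):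
--             for j in range(i + 1, len(idxs)):
--                 a, b = idxs[i], idxs[j]
--                 pairs.add((a, b) if a < b else (b, a))
--     return pairs
-- ===== SOURCE B (Python) =====
-- def _candidate_pairs(items):
--     n = len(items)
--     return {(i, j)
--             for i in range(n)
--             for j in range(i + 1, n)
--             if items[i] & items[j]}
-- ===== Notes on version B (the rewrite author's own statement) =====
-- stated objective: simpler
-- what changed: Replaced the inverted token index (defaultdict + per-token pair enumeration with min/max normalization) by a single set comprehension over index pairs i<j testing items[i] & items[j]; Pre_ only excludes Lean-side inner lists with duplicate tokens, which do not represent Python set values.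
import Mathlib
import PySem

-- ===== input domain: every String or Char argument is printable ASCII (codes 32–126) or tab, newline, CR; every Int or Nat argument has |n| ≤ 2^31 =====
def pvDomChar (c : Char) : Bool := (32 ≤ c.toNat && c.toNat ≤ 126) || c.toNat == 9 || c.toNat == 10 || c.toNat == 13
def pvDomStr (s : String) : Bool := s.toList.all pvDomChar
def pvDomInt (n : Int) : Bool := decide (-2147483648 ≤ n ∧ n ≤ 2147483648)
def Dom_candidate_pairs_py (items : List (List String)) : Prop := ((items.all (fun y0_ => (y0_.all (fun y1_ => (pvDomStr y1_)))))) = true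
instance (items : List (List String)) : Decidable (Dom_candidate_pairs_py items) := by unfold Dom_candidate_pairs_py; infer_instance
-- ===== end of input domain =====

-- B replaces A's inverted token index by a direct set comprehension over index pairs (simpler, not faster).


-- Python returns a set, whose iteration order is not modelled (PYSEM.md): both ports
-- return the set's elements in the canonical (lexicographically sorted) order, so the
-- list is a well-defined representation of the returned set.
def cpCanon (s : List (Int × Int)) : List (Int × Int) :=
  PySem.List.sorted s (fun p => toLex p)

-- ===== PORT A =====
def candidate_pairs_py (items : List (List String)) : List (Int × Int) :=
  -- inv: Dict[str, List[int]]; for i, toks in enumerate(items): for t in toks: inv[t].append(i)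
  let inv : PySem.Dict String (List Int) :=
    (PySem.List.enumerate items).foldl
      (fun d pr => pr.2.foldl (fun d t => d.modify t [] (fun v => v ++ [pr.1])) d) PySem.Dict.empty
  -- pairs = set(); for idxs in inv.values(): …
  let pairs : PySem.Set (Int × Int) :=
    inv.values.foldl
      (fun pairs idxs =>
        if (idxs.length : Int) ≤ 1 then pairs
        else
          (PySem.List.pyRange 0 (idxs.length : Int)).foldl
            (fun pairs i =>
              (PySem.List.pyRange (i + 1) (idxs.length : Int)).foldl
                (fun pairs j =>
                  let a := PySem.List.pyGetD idxs i 0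
                  let b := PySem.List.pyGetD idxs j 0
                  PySem.Set.add pairs (if a < b then (a, b) else (b, a)))
                pairs)
            pairs)
      (PySem.Set.empty)
  cpCanon pairs

-- ===== PORT B =====
def candidate_pairs_py_alt (items : List (List String)) : List (Int × Int) :=
  -- n = len(items); {(i, j) for i in range(n) for j in range(i+1, n) if items[i] & items[j]}
  let n : Int := (items.length : Int)
  cpCanon
    ((PySem.List.pyRange 0 n).foldl
      (fun s i =>
        (PySem.List.pyRange (i + 1) n).foldl
          (fun s j =>
            if PySem.Set.inter (PySem.List.pyGetD items i []) (PySem.List.pyGetD items j []) ≠ [] then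
              PySem.Set.add s (i, j)
            else s)
          s)
      (PySem.Set.empty : PySem.Set (Int × Int)))

-- ===== PRECONDITION & SPEC =====
-- Pre_ only requires each inner list to have distinct elements: the Python parameter is a
-- list of SETS, so a list with duplicate tokens in one item does not represent any Python input.
def Pre_candidate_pairs_py (items : List (List String)) : Prop :=
  ∀ l ∈ items, l.Nodup
instance (items : List (List String)) : Decidable (Pre_candidate_pairs_py items) := by unfold Pre_candidate_pairs_py; infer_instance

def pvWitness_candidate_pairs_py : List (List String) := [["a", "b"], ["b"], ["c"]]

def Spec_candidate_pairs_py (items : List (List String)) (out : List (Int × Int)) : Prop := out = candidate_pairs_py_alt items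
instance (items : List (List String)) (out : List (Int × Int)) : Decidable (Spec_candidate_pairs_py items out) := by unfold Spec_candidate_pairs_py; infer_instance

-- ===== CLAIM (what is proved, stated in full; the proofs are below) =====
def Claim_equal_candidate_pairs_py : Prop := ∀ (items : List (List String)), Dom_candidate_pairs_py items → Pre_candidate_pairs_py items → Spec_candidate_pairs_py items (candidate_pairs_py items)

-- ===== LEMMAS AND PROOFS =====

-- The raw (pre-canonicalisation) sets built by the two ports, named for the proofs.
def cpRawA (items : List (List String)) : PySem.Set (Int × Int) :=
  let inv : PySem.Dict String (List Int) :=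
    (PySem.List.enumerate items).foldl
      (fun d pr => pr.2.foldl (fun d t => d.modify t [] (fun v => v ++ [pr.1])) d) PySem.Dict.empty
  inv.values.foldl
    (fun pairs idxs =>
      if (idxs.length : Int) ≤ 1 then pairs
      else
        (PySem.List.pyRange 0 (idxs.length : Int)).foldl
          (fun pairs i =>
            (PySem.List.pyRange (i + 1) (idxs.length : Int)).foldl
              (fun pairs j =>
                let a := PySem.List.pyGetD idxs i 0
                let b := PySem.List.pyGetD idxs j 0
                PySem.Set.add pairs (if a < b then (a, b) else (b, a)))
              pairs)
          pairs)
    (PySem.Set.empty)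

def cpRawB (items : List (List String)) : PySem.Set (Int × Int) :=
  (PySem.List.pyRange 0 (items.length : Int)).foldl
    (fun s i =>
      (PySem.List.pyRange (i + 1) (items.length : Int)).foldl
        (fun s j =>
          if PySem.Set.inter (PySem.List.pyGetD items i []) (PySem.List.pyGetD items j []) ≠ [] then
            s.add (i, j)
          else s)
        s)
    (PySem.Set.empty : PySem.Set (Int × Int))

theorem cpA_eq_canon_raw (items : List (List String)) :
    candidate_pairs_py items = cpCanon (cpRawA items) := rfl

theorem cpB_eq_canon_raw (items : List (List String)) :
    candidate_pairs_py_alt items = cpCanon (cpRawB items) := rfl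

-- the pairs both programs describe: indices a < b of items sharing a token
def cpGood (items : List (List String)) (p : Int × Int) : Prop :=
  ∃ a b : Nat, a < b ∧ b < items.length ∧ p = ((a : Int), (b : Int)) ∧
    ∃ t, t ∈ items.getD a [] ∧ t ∈ items.getD b []

-- generic membership through a foldl whose step satisfies a membership rule
theorem cp_mem_foldl {β α : Type} (l : List β) (g : List α → β → List α)
    (Q : β → α → Prop) (hg : ∀ s b x, x ∈ g s b ↔ x ∈ s ∨ Q b x) :
    ∀ (s : List α) (x : α), x ∈ l.foldl g s ↔ x ∈ s ∨ ∃ b ∈ l, Q b x := by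
  induction l with
  | nil => simp
  | cons b l ih =>
    intro s x
    rw [List.foldl_cons, ih, hg]
    simp only [List.mem_cons]
    constructor
    · rintro ((h | h) | ⟨c, hc, hq⟩)
      · exact Or.inl h
      · exact Or.inr ⟨b, Or.inl rfl, h⟩
      · exact Or.inr ⟨c, Or.inr hc, hq⟩
    · rintro (h | ⟨c, (rfl | hc), hq⟩)
      · exact Or.inl (Or.inl h)
      · exact Or.inl (Or.inr hq)
      · exact Or.inr ⟨c, hc, hq⟩

-- generic nodup preservation through a foldl
theorem cp_nodup_foldl {β α : Type} (l : List β) (g : List α → β → List α)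
    (hg : ∀ s b, s.Nodup → (g s b).Nodup) :
    ∀ s : List α, s.Nodup → (l.foldl g s).Nodup := by
  induction l with
  | nil => intro s hs; simpa using hs
  | cons b l ih => intro s hs; exact ih _ (hg _ _ hs)

def cpFlat (items : List (List String)) : List (String × Int) :=
  (PySem.List.enumerate items).flatMap (fun pr => pr.2.map (fun u => (u, pr.1)))

def cpInv (items : List (List String)) : PySem.Dict String (List Int) :=
  (cpFlat items).foldl (fun d p => d.modify p.1 [] (fun v => v ++ [p.2])) PySem.Dict.empty

def cpIdx (items : List (List String)) (t : String) : List Int :=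
  ((PySem.List.enumerate items).filter (fun pr => decide (t ∈ pr.2))).map (·.1)

def cpPairsStep (pairs : PySem.Set (Int × Int)) (idxs : List Int) : PySem.Set (Int × Int) :=
  if (idxs.length : Int) ≤ 1 then pairs
  else
    (PySem.List.pyRange 0 (idxs.length : Int)).foldl
      (fun pairs i =>
        (PySem.List.pyRange (i + 1) (idxs.length : Int)).foldl
          (fun pairs j =>
            let a := PySem.List.pyGetD idxs i 0
            let b := PySem.List.pyGetD idxs j 0
            PySem.Set.add pairs (if a < b then (a, b) else (b, a)))
          pairs)
      pairs

theorem cpInv_eq (items : List (List String)) :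
    ((PySem.List.enumerate items).foldl
      (fun d pr => pr.2.foldl (fun d t => d.modify t [] (fun v => v ++ [pr.1])) d)
      PySem.Dict.empty) = cpInv items := by
  simp only [cpInv, cpFlat, List.foldl_flatMap, List.foldl_map]

theorem cpRawA_eq (items : List (List String)) :
    cpRawA items = (cpInv items).values.foldl cpPairsStep PySem.Set.empty := by
  simp only [cpRawA]
  rw [cpInv_eq]
  rfl

theorem cp_filter_nodup (l : List String) (t : String) (h : l.Nodup) :
    l.filter (fun u => u == t) = if t ∈ l then [t] else [] := by
  rw [List.filter_beq]
  by_cases hm : t ∈ l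
  · simp [hm, List.count_eq_one_of_mem h hm]
  · simp [hm, List.count_eq_zero_of_not_mem hm]

theorem cpFlat_char (l : List (Int × List String)) (hnd : ∀ pr ∈ l, pr.2.Nodup) (t : String) :
    ((l.flatMap (fun pr => pr.2.map (fun u => (u, pr.1)))).filter (fun p => p.1 == t)).map (fun x => x.2)
      = (l.filter (fun pr => decide (t ∈ pr.2))).map (fun x => x.1) := by
  induction l with
  | nil => simp
  | cons pr l ih =>
    simp only [List.flatMap_cons, List.filter_append, List.map_append, List.filter_cons]
    rw [ih (fun q hq => hnd q (List.mem_cons_of_mem _ hq))]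
    have h1 : (pr.2.map (fun u => (u, pr.1))).filter (fun p => p.1 == t)
        = (pr.2.filter (fun u => u == t)).map (fun u => (u, pr.1)) := by
      rw [List.filter_map]
      rfl
    rw [h1, cp_filter_nodup _ _ (hnd pr List.mem_cons_self)]
    by_cases hm : t ∈ pr.2
    · simp [hm]
    · simp [hm]

theorem cpInv_getD (items : List (List String)) (h : Pre_candidate_pairs_py items) (t : String) :
    (cpInv items).getD t [] = cpIdx items t := by
  unfold cpInv
  rw [PySem.Dict.getD_foldl_modify_append, PySem.Dict.getD_empty, List.nil_append]
  unfold cpFlat cpIdx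
  apply cpFlat_char
  intro pr hpr
  rw [PySem.List.mem_enumerate_iff] at hpr
  obtain ⟨k, hk, rfl⟩ := hpr
  exact h _ (List.getElem_mem hk)

theorem cpIdx_mem (items : List (List String)) (t : String) (a : Int) :
    a ∈ cpIdx items t ↔ ∃ k : Nat, k < items.length ∧ t ∈ items.getD k [] ∧ a = (k : Int) := by
  simp only [cpIdx, List.mem_map, List.mem_filter, PySem.List.mem_enumerate_iff]
  constructor
  · rintro ⟨pr, ⟨⟨k, hk, rfl⟩, hmem⟩, rfl⟩
    simp only [decide_eq_true_eq] at hmem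
    exact ⟨k, hk, by rw [List.getD_eq_getElem _ _ hk]; exact hmem, by simp⟩
  · rintro ⟨k, hk, hm, rfl⟩
    refine ⟨(0 + (k : Int), items[k]), ⟨⟨k, hk, rfl⟩, ?_⟩, by simp⟩
    simp only [decide_eq_true_eq]
    rw [List.getD_eq_getElem _ _ hk] at hm
    exact hm

theorem cpIdx_nodup (items : List (List String)) (t : String) : (cpIdx items t).Nodup := by
  have hp := (PySem.List.pairwise_lt_enumerate items 0).filter (fun pr => decide (t ∈ pr.2))
  have h2 : (cpIdx items t).Pairwise (· < ·) := List.pairwise_map.mpr hp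
  exact List.Pairwise.imp (fun h => ne_of_lt h) h2

theorem cpInv_keys_nodup (items : List (List String)) : (cpInv items).keys.Nodup := by
  unfold cpInv
  exact PySem.Dict.nodup_keys_foldl_modify_key (cpFlat items) (fun p => p.1) []
    (fun _ p => fun v => v ++ [p.2]) PySem.Dict.empty PySem.Dict.nodup_keys_empty

theorem cpInv_mem_values (items : List (List String)) (h : Pre_candidate_pairs_py items)
    (idxs : List Int) :
    idxs ∈ (cpInv items).values ↔ ∃ t ∈ (cpInv items).keys, idxs = cpIdx items t := by
  rw [PySem.Dict.values_eq_map_keys _ (cpInv_keys_nodup items) []]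
  simp only [List.mem_map]
  constructor
  · rintro ⟨t, ht, rfl⟩
    exact ⟨t, ht, cpInv_getD items h t⟩
  · rintro ⟨t, ht, rfl⟩
    exact ⟨t, ht, cpInv_getD items h t⟩

theorem cpInv_mem_keys (items : List (List String)) (t : String) (k : Nat)
    (hk : k < items.length) (hm : t ∈ items.getD k []) : t ∈ (cpInv items).keys := by
  unfold cpInv
  rw [PySem.Dict.keys_foldl_modify_key (cpFlat items) (fun p => p.1) []
    (fun _ p => fun v => v ++ [p.2]) PySem.Dict.empty]
  rw [PySem.Set.mem_update]
  right
  simp only [List.mem_map, cpFlat, List.mem_flatMap]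
  refine ⟨(t, 0 + (k : Int)), ⟨(0 + (k : Int), items[k]), ?_, ?_⟩, rfl⟩
  · rw [PySem.List.mem_enumerate_iff]
    exact ⟨k, hk, rfl⟩
  · rw [List.getD_eq_getElem _ _ hk] at hm
    exact ⟨t, hm, rfl⟩

theorem cpPairs_of_idxs (idxs : List Int) (hnd : idxs.Nodup) (x : Int × Int) :
    (¬((idxs.length : Int) ≤ 1) ∧ ∃ i : Int, (0 ≤ i ∧ i < (idxs.length : Int)) ∧
      ∃ j : Int, i < j ∧ j < (idxs.length : Int) ∧
        x = (if PySem.List.pyGetD idxs i 0 < PySem.List.pyGetD idxs j 0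
              then (PySem.List.pyGetD idxs i 0, PySem.List.pyGetD idxs j 0)
              else (PySem.List.pyGetD idxs j 0, PySem.List.pyGetD idxs i 0)))
    ↔ ∃ a b : Int, a ∈ idxs ∧ b ∈ idxs ∧ a < b ∧ x = (a, b) := by
  constructor
  · rintro ⟨-, i, ⟨hi0, hilen⟩, j, hij, hjlen, rfl⟩
    have hj0 : (0 : Int) ≤ j := by omega
    have hilt : i.toNat < idxs.length := by omega
    have hjlt : j.toNat < idxs.length := by omega
    rw [PySem.List.pyGetD_of_nonneg _ _ hi0, PySem.List.pyGetD_of_nonneg _ _ hj0,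
      List.getD_eq_getElem _ _ hilt, List.getD_eq_getElem _ _ hjlt]
    have hne : idxs[i.toNat] ≠ idxs[j.toNat] := by
      rw [ne_eq, hnd.getElem_inj_iff]
      omega
    by_cases hlt : idxs[i.toNat] < idxs[j.toNat]
    · exact ⟨idxs[i.toNat], idxs[j.toNat], List.getElem_mem hilt, List.getElem_mem hjlt, hlt,
        by simp [hlt]⟩
    · have hgt : idxs[j.toNat] < idxs[i.toNat] := by
        rcases lt_or_ge idxs[j.toNat] idxs[i.toNat] with h | h
        · exact h
        · exact absurd (le_antisymm (not_lt.mp hlt) h).symm hne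
      exact ⟨idxs[j.toNat], idxs[i.toNat], List.getElem_mem hjlt, List.getElem_mem hilt, hgt,
        by simp [hlt]⟩
  · rintro ⟨a, b, ha, hb, hab, rfl⟩
    obtain ⟨ia, hia, rfl⟩ := List.mem_iff_getElem.mp ha
    obtain ⟨ib, hib, rfl⟩ := List.mem_iff_getElem.mp hb
    have hne : ia ≠ ib := by
      intro hcontra
      subst hcontra
      exact absurd rfl (ne_of_lt hab)
    have hgd : ∀ (k : Nat) (hk : k < idxs.length),
        PySem.List.pyGetD idxs (k : Int) 0 = idxs[k] := by
      intro k hk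
      rw [PySem.List.pyGetD_of_nonneg _ _ (by omega : (0:Int) ≤ (k:Int))]
      simp only [Int.toNat_natCast]
      exact List.getD_eq_getElem _ _ hk
    refine ⟨by omega, ?_⟩
    rcases Nat.lt_or_ge ia ib with hlt | hge
    · refine ⟨(ia : Int), ⟨by omega, by omega⟩, (ib : Int), by omega, by omega, ?_⟩
      rw [hgd ia hia, hgd ib hib]
      simp [hab]
    · have hlt' : ib < ia := by omega
      refine ⟨(ib : Int), ⟨by omega, by omega⟩, (ia : Int), by omega, by omega, ?_⟩
      rw [hgd ib hib, hgd ia hia]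
      simp [not_lt.mpr (le_of_lt hab)]

theorem cpPairsStep_mem (s : PySem.Set (Int × Int)) (idxs : List Int) (x : Int × Int) :
    x ∈ cpPairsStep s idxs ↔ x ∈ s ∨
      (¬((idxs.length : Int) ≤ 1) ∧ ∃ i : Int, (0 ≤ i ∧ i < (idxs.length : Int)) ∧
        ∃ j : Int, i < j ∧ j < (idxs.length : Int) ∧
          x = (if PySem.List.pyGetD idxs i 0 < PySem.List.pyGetD idxs j 0
                then (PySem.List.pyGetD idxs i 0, PySem.List.pyGetD idxs j 0)
                else (PySem.List.pyGetD idxs j 0, PySem.List.pyGetD idxs i 0))) := by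
  unfold cpPairsStep
  by_cases hlen : (idxs.length : Int) ≤ 1
  · simp [hlen]
  · simp only [if_neg hlen]
    rw [cp_mem_foldl _ _
        (fun i x => ∃ j : Int, i < j ∧ j < (idxs.length : Int) ∧
          x = (if PySem.List.pyGetD idxs i 0 < PySem.List.pyGetD idxs j 0
                then (PySem.List.pyGetD idxs i 0, PySem.List.pyGetD idxs j 0)
                else (PySem.List.pyGetD idxs j 0, PySem.List.pyGetD idxs i 0)))
        ?hgout]
    case hgout =>
      intro s i x
      rw [cp_mem_foldl _ _
          (fun j x => x = (if PySem.List.pyGetD idxs i 0 < PySem.List.pyGetD idxs j 0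
                then (PySem.List.pyGetD idxs i 0, PySem.List.pyGetD idxs j 0)
                else (PySem.List.pyGetD idxs j 0, PySem.List.pyGetD idxs i 0)))
          (by intro s j x; simp [PySem.Set.mem_add])]
      simp only [PySem.List.mem_pyRange_one]
      constructor
      · rintro (h | ⟨j, ⟨h1, h2⟩, h3⟩)
        · exact Or.inl h
        · exact Or.inr ⟨j, by omega, h2, h3⟩
      · rintro (h | ⟨j, h1, h2, h3⟩)
        · exact Or.inl h
        · exact Or.inr ⟨j, ⟨by omega, h2⟩, h3⟩
    simp only [PySem.List.mem_pyRange_one]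
    constructor
    · rintro (h | ⟨i, hi, hrest⟩)
      · exact Or.inl h
      · exact Or.inr ⟨hlen, i, hi, hrest⟩
    · rintro (h | ⟨-, i, hi, hrest⟩)
      · exact Or.inl h
      · exact Or.inr ⟨i, hi, hrest⟩

theorem cpRawA_mem (items : List (List String)) (h : Pre_candidate_pairs_py items)
    (p : Int × Int) : p ∈ cpRawA items ↔ cpGood items p := by
  rw [cpRawA_eq]
  rw [cp_mem_foldl _ _
      (fun idxs x => ¬((idxs.length : Int) ≤ 1) ∧ ∃ i : Int, (0 ≤ i ∧ i < (idxs.length : Int)) ∧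
        ∃ j : Int, i < j ∧ j < (idxs.length : Int) ∧
          x = (if PySem.List.pyGetD idxs i 0 < PySem.List.pyGetD idxs j 0
                then (PySem.List.pyGetD idxs i 0, PySem.List.pyGetD idxs j 0)
                else (PySem.List.pyGetD idxs j 0, PySem.List.pyGetD idxs i 0)))
      (fun s idxs x => cpPairsStep_mem s idxs x)]
  simp only [PySem.Set.empty, List.not_mem_nil, false_or]
  constructor
  · rintro ⟨idxs, hv, hq⟩
    obtain ⟨t, -, rfl⟩ := (cpInv_mem_values items h idxs).mp hv
    obtain ⟨a, b, ha, hb, hab, rfl⟩ := (cpPairs_of_idxs _ (cpIdx_nodup items t) p).mp hq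
    obtain ⟨ka, hka, hta, rfl⟩ := (cpIdx_mem items t a).mp ha
    obtain ⟨kb, hkb, htb, rfl⟩ := (cpIdx_mem items t b).mp hb
    exact ⟨ka, kb, by exact_mod_cast hab, hkb, rfl, t, hta, htb⟩
  · rintro ⟨ka, kb, hab, hkb, rfl, t, hta, htb⟩
    refine ⟨cpIdx items t, ?_, ?_⟩
    · exact (cpInv_mem_values items h _).mpr
        ⟨t, cpInv_mem_keys items t ka (by omega) hta, rfl⟩
    · apply (cpPairs_of_idxs _ (cpIdx_nodup items t) _).mpr
      refine ⟨(ka : Int), (kb : Int), ?_, ?_, by exact_mod_cast hab, rfl⟩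
      · exact (cpIdx_mem items t _).mpr ⟨ka, by omega, hta, rfl⟩
      · exact (cpIdx_mem items t _).mpr ⟨kb, hkb, htb, rfl⟩

theorem cpRawB_mem (items : List (List String)) (p : Int × Int) :
    p ∈ cpRawB items ↔ cpGood items p := by
  unfold cpRawB
  rw [cp_mem_foldl _ _
      (fun i x => ∃ j : Int, i < j ∧ j < (items.length : Int) ∧
        (PySem.Set.inter (PySem.List.pyGetD items i []) (PySem.List.pyGetD items j []) ≠ []) ∧ x = (i, j))
      ?hgout]
  case hgout =>
    intro s i x
    rw [cp_mem_foldl _ _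
        (fun j x => (PySem.Set.inter (PySem.List.pyGetD items i []) (PySem.List.pyGetD items j []) ≠ []) ∧ x = (i, j))
        (by
          intro s j x
          by_cases hc : PySem.Set.inter (PySem.List.pyGetD items i []) (PySem.List.pyGetD items j []) = []
          · simp [hc]
          · simp [hc, PySem.Set.mem_add])]
    simp only [PySem.List.mem_pyRange_one]
    constructor
    · rintro (h | ⟨j, ⟨h1, h2⟩, h3, h4⟩)
      · exact Or.inl h
      · exact Or.inr ⟨j, by omega, h2, h3, h4⟩
    · rintro (h | ⟨j, h1, h2, h3, h4⟩)
      · exact Or.inl h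
      · exact Or.inr ⟨j, ⟨by omega, h2⟩, h3, h4⟩
  simp only [PySem.List.mem_pyRange_one, PySem.Set.empty, List.not_mem_nil, false_or]
  constructor
  · rintro ⟨i, ⟨h0, _⟩, j, hij, hjn, hne, rfl⟩
    obtain ⟨t, ht⟩ := List.exists_mem_of_ne_nil _ hne
    rw [PySem.Set.mem_inter] at ht
    refine ⟨i.toNat, j.toNat, by omega, by omega, by simp [Int.toNat_of_nonneg h0, Int.toNat_of_nonneg (by omega : (0:Int) ≤ j)], t, ?_, ?_⟩
    · rw [PySem.List.pyGetD_of_nonneg _ _ h0] at ht; exact ht.1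
    · rw [PySem.List.pyGetD_of_nonneg _ _ (by omega : (0:Int) ≤ j)] at ht; exact ht.2
  · rintro ⟨a, b, hab, hbn, rfl, t, hta, htb⟩
    refine ⟨(a : Int), ⟨by omega, by omega⟩, (b : Int), by omega, by omega, ?_, rfl⟩
    apply List.ne_nil_of_mem (a := t)
    rw [PySem.Set.mem_inter]
    constructor
    · rw [PySem.List.pyGetD_of_nonneg _ _ (by omega : (0:Int) ≤ (a:Int))]; simpa using hta
    · rw [PySem.List.pyGetD_of_nonneg _ _ (by omega : (0:Int) ≤ (b:Int))]; simpa using htb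

theorem cpRawA_nodup (items : List (List String)) : (cpRawA items).Nodup := by
  rw [cpRawA_eq]
  apply cp_nodup_foldl
  · intro s idxs hs
    unfold cpPairsStep
    split
    · exact hs
    · apply cp_nodup_foldl
      · intro s i hsi
        apply cp_nodup_foldl
        · intro s j hsj
          exact PySem.Set.nodup_add _ _ hsj
        · exact hsi
      · exact hs
  · exact List.nodup_nil

theorem cpRawB_nodup (items : List (List String)) : (cpRawB items).Nodup := by
  unfold cpRawB
  apply cp_nodup_foldl
  · intro s i hs
    apply cp_nodup_foldl
    · intro s j hs
      split
      · exact PySem.Set.nodup_add _ _ hs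
      · exact hs
    · exact hs
  · exact List.nodup_nil

-- ===== VERDICT (by name: the statement is the Claim_ definition above) =====
theorem candidate_pairs_py_spec : Claim_equal_candidate_pairs_py := by
  intro items _ hpre
  unfold Spec_candidate_pairs_py
  rw [cpA_eq_canon_raw, cpB_eq_canon_raw]
  unfold cpCanon
  apply PySem.List.sorted_eq_sorted_of_perm _ _ _ (Equiv.injective toLex)
  rw [List.perm_ext_iff_of_nodup (cpRawA_nodup items) (cpRawB_nodup items)]
  intro p
  rw [cpRawA_mem items hpre p, cpRawB_mem items p]
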